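-- pv_equiv track=rewrite | github.com/xogns3725/codeTest | 배열의 유사도.py | solution
-- ===== SOURCE A (Python) =====
-- def solution(s1, s2):
--     answer = 0
--     # s1과 s2 중 더 짧은 배열 선택
--     min_s = min(len(s1), len(s2))
--     # 더 짧은 배열을 선택해야지 인덱스 범위를 초과하지 않음
--     for i in range(min_s):
--         # s1이 더 긴 경우
--         if len(s1) >= len(s2):
--             # s1 안에 s2[i]에 해당하는 값이 있는지 확인
--             if s2[i] in s1:
--                 answer += 1
--         # s2가 더 긴 경우
--         else:
--             # s2 안에 s1[i]에 해당하는 값이 있는지 확인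
--             if s1[i] in s2:
--                 answer += 1
--     return answer
-- ===== SOURCE B (Python) =====
-- def _bisect_left(a, x):
--     lo, hi = 0, len(a)
--     while lo < hi:
--         mid = (lo + hi) // 2
--         if a[mid] < x:
--             lo = mid + 1
--         else:
--             hi = mid
--     return lo
--
--
-- def solution(s1, s2):
--     longer, shorter = (s1, s2) if len(s1) >= len(s2) else (s2, s1)
--     srt = sorted(longer)
--     n = len(srt)
--     count = 0
--     for x in shorter:
--         i = _bisect_left(srt, x)
--         if i < n and srt[i] == x:
--             count += 1
--     return count
-- ===== Notes on version B (the rewrite author's own statement) =====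
-- stated objective: faster
-- what changed: Replaces A's per-element linear 'in' scans of the longer array (with the longer/shorter test re-evaluated inside the loop) by selecting longer/shorter once, sorting the longer array, and binary-searching each element of the shorter one.
import Mathlib
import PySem

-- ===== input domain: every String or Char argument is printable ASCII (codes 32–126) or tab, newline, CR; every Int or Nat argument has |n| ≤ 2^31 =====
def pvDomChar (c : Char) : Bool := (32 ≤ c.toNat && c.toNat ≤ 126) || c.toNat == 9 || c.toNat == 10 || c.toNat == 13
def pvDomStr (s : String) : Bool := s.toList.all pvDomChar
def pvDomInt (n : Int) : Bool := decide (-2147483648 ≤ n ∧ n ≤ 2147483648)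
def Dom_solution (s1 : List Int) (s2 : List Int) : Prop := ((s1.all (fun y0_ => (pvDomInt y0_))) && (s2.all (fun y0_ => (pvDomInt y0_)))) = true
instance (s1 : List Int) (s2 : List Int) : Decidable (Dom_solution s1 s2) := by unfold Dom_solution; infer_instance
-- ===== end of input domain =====

-- B replaces A's per-element linear scans of the longer array by sorting it once and
-- binary-searching each element of the shorter one (objective: alternative index-first strategy).

-- ===== PORT A =====
-- A: loop i over range(min(len(s1), len(s2))); inside, re-test which list is longer and
-- test membership of the i-th element of the shorter list in the longer one by a linear 'in'.
-- i is always in range, so Python's s[i] is ported as pyGetD (never hit out of range).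
def solution (s1 : List Int) (s2 : List Int) : Int :=
  let min_s : Int := min (PySem.List.len s1) (PySem.List.len s2)
  (PySem.List.pyRange 0 min_s 1).foldl
    (fun answer i =>
      if PySem.List.len s1 ≥ PySem.List.len s2 then
        if s1.contains (PySem.List.pyGetD s2 i 0) then answer + 1 else answer
      else
        if s2.contains (PySem.List.pyGetD s1 i 0) then answer + 1 else answer)
    0

-- ===== PORT B =====
-- B: pick longer/shorter once (ties keep s1 as longer), sort the longer list, then for each
-- x of the shorter list do a binary search (Source B's hand-written _bisect_left is exactly the
-- lo/hi halving loop PySem.List.bisectLeft implements) and count hits.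
-- 'i < n and srt[i] == x' short-circuits, so srt[i] is ported as getD (only read when i < n).
def solution_alt (s1 : List Int) (s2 : List Int) : Int :=
  let longer := if s1.length ≥ s2.length then s1 else s2
  let shorter := if s1.length ≥ s2.length then s2 else s1
  let srt := PySem.List.sorted longer (fun x => x) false
  let n := srt.length
  shorter.foldl
    (fun count x =>
      let i := PySem.List.bisectLeft srt x
      if i < n ∧ srt.getD i 0 = x then count + 1 else count)
    0

-- ===== PRECONDITION & SPEC =====
def Spec_solution (s1 : List Int) (s2 : List Int) (out : Int) : Prop := out = solution_alt s1 s2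
instance (s1 : List Int) (s2 : List Int) (out : Int) : Decidable (Spec_solution s1 s2 out) := by unfold Spec_solution; infer_instance

-- ===== CLAIM (what is proved, stated in full; the proofs are below) =====
def Claim_equal_solution : Prop := ∀ (s1 : List Int) (s2 : List Int), Dom_solution s1 s2 → Spec_solution s1 s2 (solution s1 s2)

-- ===== LEMMAS AND PROOFS =====

-- bisect-membership: on the sorted copy, the hit test of B is exactly list membership.
theorem bisect_hit_iff (srt : List Int) (x : Int)
    (hs : List.Pairwise (fun a b => a ≤ b) srt) :
    ((PySem.List.bisectLeft srt x < srt.length ∧ srt.getD (PySem.List.bisectLeft srt x) 0 = x)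
      ↔ x ∈ srt) := by
  obtain ⟨hle, hlt, hge⟩ := PySem.List.bisectLeft_spec srt x hs
  constructor
  · rintro ⟨hi, hx⟩
    rw [List.getD_eq_getElem srt 0 hi] at hx
    exact hx ▸ List.getElem_mem hi
  · intro hx
    obtain ⟨j, hj, hxj⟩ := List.getElem_of_mem hx
    set i := PySem.List.bisectLeft srt x with hidef
    have hij : i ≤ j := by
      by_contra h
      exact absurd (hxj ▸ hlt j hj (by omega)) (lt_irrefl x)
    have hin : i < srt.length := lt_of_le_of_lt hij hj
    refine ⟨hin, ?_⟩
    rw [List.getD_eq_getElem srt 0 hin]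
    have h1 : x ≤ srt[i] := hge i hin le_rfl
    have h2 : srt[i] ≤ srt[j] := by
      rcases Nat.lt_or_ge i j with h | h
      · exact List.pairwise_iff_getElem.mp hs i j hin hj h
      · have : i = j := le_antisymm hij h
        simp [this]
    omega

-- B counts, over the shorter list, the elements present in the longer list.
theorem alt_eq_count (longer shorter : List Int) :
    (let srt := PySem.List.sorted longer (fun x => x) false
     shorter.foldl
       (fun count x =>
         let i := PySem.List.bisectLeft srt x
         if i < srt.length ∧ srt.getD i 0 = x then count + 1 else count) 0)
      = (shorter.countP (fun x => longer.contains x) : Int) := by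
  simp only
  rw [PySem.List.foldl_ite_add_one
      (p := fun x => PySem.List.bisectLeft (PySem.List.sorted longer (fun x => x) false) x
              < (PySem.List.sorted longer (fun x => x) false).length ∧
            (PySem.List.sorted longer (fun x => x) false).getD
              (PySem.List.bisectLeft (PySem.List.sorted longer (fun x => x) false) x) 0 = x)]
  rw [zero_add]
  congr 1
  apply List.countP_congr
  intro x _
  have := bisect_hit_iff (PySem.List.sorted longer (fun x => x) false) x
    (PySem.List.sorted_pairwise longer (fun x => x))
  simp only [PySem.List.mem_sorted] at this
  simp only [List.contains_iff_mem]
  simpa [List.getD] using this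

-- A counts, over the indices of the shorter list, the elements present in the longer list.
theorem a_eq_count (longer shorter : List Int) (h : shorter.length ≤ longer.length) :
    ((PySem.List.pyRange 0 (min (PySem.List.len longer) (PySem.List.len shorter)) 1).foldl
      (fun answer i => if longer.contains (PySem.List.pyGetD shorter i 0) then answer + 1 else answer) 0)
      = (shorter.countP (fun x => longer.contains x) : Int) := by
  have hmin : min (PySem.List.len longer) (PySem.List.len shorter) = PySem.List.len shorter := by
    simp [PySem.List.len_eq]; omega
  rw [hmin]
  rw [PySem.List.foldl_pyRange_zero_pyGetD shorter 0
        (fun answer v => if longer.contains v then answer + 1 else answer) 0]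
  rw [PySem.List.foldl_if_add_one, zero_add]

-- ===== VERDICT (by name: the statement is the Claim_ definition above) =====
theorem solution_spec : Claim_equal_solution := by
  intro s1 s2 _
  unfold Spec_solution solution solution_alt
  by_cases h : s1.length ≥ s2.length
  · have hlen : PySem.List.len s1 ≥ PySem.List.len s2 := by simp [PySem.List.len_eq]; omega
    simp only [if_pos hlen, if_pos h]
    rw [a_eq_count s1 s2 h, alt_eq_count s1 s2]
  · have hlen : ¬ PySem.List.len s1 ≥ PySem.List.len s2 := by simp [PySem.List.len_eq]; omega
    simp only [if_neg hlen, if_neg h]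
    rw [min_comm (PySem.List.len s1)]
    rw [a_eq_count s2 s1 (by omega), alt_eq_count s2 s1]
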